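-- pv_equiv track=rewrite | github.com/ChahelPaatur/Self-Modifying-Program-Synthesis-via-Online-Library-Evolution | models/canonicalizer/solver.py | find_color_mapping
-- ===== SOURCE A (Python) =====
-- from typing import List, Dict, Tuple, Optional, Set
--
-- Grid = List[List[int]]
--
-- def grids_same_shape(g1: Grid, g2: Grid) -> bool:
--     if not g1 or not g2:
--         return len(g1) == len(g2)
--     return len(g1) == len(g2) and len(g1[0]) == len(g2[0])
--
-- def find_color_mapping(src: Grid, tgt: Grid) -> Optional[Dict[int, int]]:
--     """Find color bijection src -> tgt if grids have same structure"""
--     if not grids_same_shape(src, tgt):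
--         return None
--
--     mapping = {}
--     for i in range(len(src)):
--         for j in range(len(src[0])):
--             s, t = src[i][j], tgt[i][j]
--             if s in mapping:
--                 if mapping[s] != t:
--                     return None  # conflict
--             else:
--                 mapping[s] = t
--     return mapping
-- ===== SOURCE B (Python) =====
-- from typing import List, Dict, Optional
--
-- Grid = List[List[int]]
--
-- def grids_same_shape(g1: Grid, g2: Grid) -> bool:
--     if not g1 or not g2:
--         return len(g1) == len(g2)
--     return len(g1) == len(g2) and len(g1[0]) == len(g2[0])
--
-- def find_color_mapping(src: Grid, tgt: Grid) -> Optional[Dict[int, int]]: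
--     """Find color bijection src -> tgt if grids have same structure"""
--     if not grids_same_shape(src, tgt):
--         return None
--     # one pass: ordered-deduplicated (source, target) pairs, conflict check deferred
--     pairs = list(dict.fromkeys(
--         (src[i][j], tgt[i][j]) for i in range(len(src)) for j in range(len(src[0]))
--     ))
--     if len({s for s, _ in pairs}) != len(pairs):
--         return None  # some source color is paired with two different targets
--     return dict(pairs)
-- ===== Notes on version B (the rewrite author's own statement) =====
-- stated objective: idiomatic
-- what changed: B replaces A's incremental dict with inline conflict branching by a single comprehension that collects ordered-deduplicated (src,tgt) cell pairs and a deferred cardinality check (|pairs| vs |distinct source colors|) to detect conflicts.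
-- outside the precondition, e.g. on find_color_mapping([[1, 1], [2]], [[0, 1], [3]]): A returns None, B raises IndexError
import Mathlib
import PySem

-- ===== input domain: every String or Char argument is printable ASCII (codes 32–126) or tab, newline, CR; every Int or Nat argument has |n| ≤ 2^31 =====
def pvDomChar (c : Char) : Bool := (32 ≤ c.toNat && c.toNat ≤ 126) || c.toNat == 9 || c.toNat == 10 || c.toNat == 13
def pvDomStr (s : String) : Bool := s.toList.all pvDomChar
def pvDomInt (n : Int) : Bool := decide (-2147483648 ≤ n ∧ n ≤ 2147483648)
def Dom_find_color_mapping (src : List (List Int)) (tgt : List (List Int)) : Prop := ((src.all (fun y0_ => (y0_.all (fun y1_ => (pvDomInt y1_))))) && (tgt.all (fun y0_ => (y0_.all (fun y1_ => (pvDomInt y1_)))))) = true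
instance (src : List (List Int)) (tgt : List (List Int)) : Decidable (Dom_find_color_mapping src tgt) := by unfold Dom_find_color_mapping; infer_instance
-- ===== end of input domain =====

-- B collects the ordered-deduplicated (src,tgt) cell pairs in one comprehension pass and detects
-- conflicts by a deferred cardinality check, instead of A's incremental dict with inline branching.


-- ===== PORT A =====
-- shared module helper grids_same_shape (identical in Source A and Source B)
def gridsSameShape (g1 g2 : List (List Int)) : Bool :=
  if g1.isEmpty || g2.isEmpty then g1.length == g2.length
  else g1.length == g2.length && (g1.headD []).length == (g2.headD []).length

def firstRowLen (g : List (List Int)) : Int := ((g.headD []).length : Int)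

-- src[i][j] (IndexError = none)
def cellAt (g : List (List Int)) (i j : Int) : Option Int :=
  (PySem.List.pyGet? g i).bind (fun r => PySem.List.pyGet? r j)

-- inner 'for j in range(len(src[0]))': some none = 'return None' (conflict), none = IndexError
def fcmInner (src tgt : List (List Int)) (i : Int) :
    List Int → PySem.Dict Int Int → Option (Option (PySem.Dict Int Int))
  | [], m => some (some m)
  | j :: js, m =>
    match cellAt src i j, cellAt tgt i j with
    | some s, some t =>
      match m.get? s with
      | some v => if v ≠ t then some none else fcmInner src tgt i js m
      | none => fcmInner src tgt i js (m.insert s t)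
    | _, _ => none

-- outer 'for i in range(len(src))'
def fcmOuter (src tgt : List (List Int)) :
    List Int → PySem.Dict Int Int → Option (Option (PySem.Dict Int Int))
  | [], m => some (some m)
  | i :: is, m =>
    match fcmInner src tgt i (PySem.List.pyRange 0 (firstRowLen src) 1) m with
    | some (some m') => fcmOuter src tgt is m'
    | r => r

def find_color_mapping (src : List (List Int)) (tgt : List (List Int)) : Option (List (Int × Int)) :=
  if gridsSameShape src tgt then
    match fcmOuter src tgt (PySem.List.pyRange 0 src.length 1) PySem.Dict.empty with
    | some (some m) => some m.items
    | _ => none   -- conflict returns None; IndexError is outside Pre_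
  else none

-- ===== PORT B =====
-- the comprehension's cells for one row i (none = IndexError)
def fcmRowCells (src tgt : List (List Int)) (i : Int) : List Int → Option (List (Int × Int))
  | [] => some []
  | j :: js =>
    match cellAt src i j, cellAt tgt i j with
    | some s, some t => (fcmRowCells src tgt i js).map (fun r => (s, t) :: r)
    | _, _ => none

-- all cells of the comprehension, row-major
def fcmAllCells (src tgt : List (List Int)) : List Int → Option (List (Int × Int))
  | [] => some []
  | i :: is =>
    match fcmRowCells src tgt i (PySem.List.pyRange 0 (firstRowLen src) 1) with
    | some row => (fcmAllCells src tgt is).map (fun rest => row ++ rest)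
    | none => none

def find_color_mapping_alt (src : List (List Int)) (tgt : List (List Int)) : Option (List (Int × Int)) :=
  if gridsSameShape src tgt then
    match fcmAllCells src tgt (PySem.List.pyRange 0 src.length 1) with
    | none => none   -- IndexError is outside Pre_
    | some cs =>
      let pairs : PySem.Set (Int × Int) := PySem.Set.ofList cs      -- list(dict.fromkeys(...))
      if (PySem.Set.ofList (pairs.map Prod.fst)).length ≠ pairs.length then none
      else some (PySem.Dict.ofList pairs).items                      -- dict(pairs)
  else none

-- ===== PRECONDITION & SPEC =====
-- same-shape test as a Prop (mirrors grids_same_shape without referring to the ports)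
def PvSameShape (src tgt : List (List Int)) : Prop :=
  src.length = tgt.length ∧ (src = [] ∨ tgt = [] ∨ (src.headD []).length = (tgt.headD []).length)

-- Pre_ excludes ragged grids that pass the (first-row-only) shape test but have a row shorter than
-- the first source row: there Python A either raises IndexError or (when a color conflict appears
-- first) returns None while B's full comprehension pass raises IndexError.
def Pre_find_color_mapping (src : List (List Int)) (tgt : List (List Int)) : Prop :=
  ¬ PvSameShape src tgt ∨
    ((∀ r ∈ src, (src.headD []).length ≤ r.length) ∧ (∀ r ∈ tgt, (src.headD []).length ≤ r.length))
instance (src : List (List Int)) (tgt : List (List Int)) : Decidable (Pre_find_color_mapping src tgt) := by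
  unfold Pre_find_color_mapping PvSameShape; infer_instance

def pvWitness_find_color_mapping : List (List Int) × List (List Int) :=
  ([[1, 2], [2, 1]], [[3, 4], [4, 3]])

def Spec_find_color_mapping (src : List (List Int)) (tgt : List (List Int)) (out : Option (List (Int × Int))) : Prop := out = find_color_mapping_alt src tgt
instance (src : List (List Int)) (tgt : List (List Int)) (out : Option (List (Int × Int))) : Decidable (Spec_find_color_mapping src tgt out) := by unfold Spec_find_color_mapping; infer_instance

-- ===== CLAIM (what is proved, stated in full; the proofs are below) =====
def Claim_equal_find_color_mapping : Prop := ∀ (src : List (List Int)) (tgt : List (List Int)), Dom_find_color_mapping src tgt → Pre_find_color_mapping src tgt → Spec_find_color_mapping src tgt (find_color_mapping src tgt)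

-- ===== LEMMAS AND PROOFS =====

-- the conflict-checking fold both programs amount to, over an already-extracted cell list
def runA : List (Int × Int) → PySem.Dict Int Int → Option (PySem.Dict Int Int)
  | [], m => some m
  | (s, t) :: cs, m =>
    match m.get? s with
    | some v => if v ≠ t then none else runA cs m
    | none => runA cs (m.insert s t)

theorem runA_append (xs ys : List (Int × Int)) (m : PySem.Dict Int Int) :
    runA (xs ++ ys) m = match runA xs m with
      | some m' => runA ys m'
      | none => none := by
  induction xs generalizing m with
  | nil => simp [runA]
  | cons p cs ih =>
    obtain ⟨s, t⟩ := p
    simp only [List.cons_append, runA]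
    cases h : (m.get? s) with
    | some v =>
      by_cases hv : v = t
      · simp [hv, ih]
      · simp [hv]
    | none => simp [ih]

theorem gridsSameShape_iff (src tgt : List (List Int)) :
    gridsSameShape src tgt = true ↔ PvSameShape src tgt := by
  unfold gridsSameShape PvSameShape
  by_cases h1 : src = [] <;> by_cases h2 : tgt = [] <;>
    simp [h1, h2, List.isEmpty_iff]

-- inner loop = runA over the row's cells, when all cell lookups succeed
theorem fcmInner_eq_runA (src tgt : List (List Int)) (i : Int) (js : List Int)
    (h : ∀ j ∈ js, ∃ s t, cellAt src i j = some s ∧ cellAt tgt i j = some t) :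
    ∃ row, fcmRowCells src tgt i js = some row ∧
      ∀ m, fcmInner src tgt i js m = some (runA row m) := by
  induction js with
  | nil => exact ⟨[], rfl, fun m => rfl⟩
  | cons j js ih =>
    obtain ⟨s, t, hs, ht⟩ := h j (by simp)
    obtain ⟨row, hrow, hrun⟩ := ih (fun j hj => h j (by simp [hj]))
    refine ⟨(s, t) :: row, ?_, ?_⟩
    · simp [fcmRowCells, hs, ht, hrow]
    · intro m
      simp only [fcmInner, hs, ht, runA]
      cases hg : m.get? s with
      | some v =>
        by_cases hv : v = t
        · simp [hv, hrun]
        · simp [hv]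
      | none => simp [hrun]

-- outer loop = runA over all cells, when all cell lookups succeed
theorem fcmOuter_eq_runA (src tgt : List (List Int)) (is : List Int)
    (h : ∀ i ∈ is, ∀ j ∈ PySem.List.pyRange 0 (firstRowLen src) 1,
        ∃ s t, cellAt src i j = some s ∧ cellAt tgt i j = some t) :
    ∃ cs, fcmAllCells src tgt is = some cs ∧
      ∀ m, fcmOuter src tgt is m = some ((runA cs m).map id) := by
  induction is with
  | nil => exact ⟨[], rfl, fun m => rfl⟩
  | cons i is ih =>
    obtain ⟨row, hrow, hruni⟩ := fcmInner_eq_runA src tgt i _ (h i (by simp))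
    obtain ⟨cs, hcs, hrun⟩ := ih (fun i hi => h i (by simp [hi]))
    refine ⟨row ++ cs, ?_, ?_⟩
    · simp [fcmAllCells, hrow, hcs]
    · intro m
      simp only [fcmOuter, hruni m, runA_append]
      cases hr : runA row m with
      | some m' => simpa using hrun m'
      | none => rfl

-- a set only grows along Set.update (original list is a prefix)
theorem set_update_prefix {α : Type} [BEq α] (cs : List α) (s : PySem.Set α) :
    s <+: PySem.Set.update s cs := by
  induction cs generalizing s with
  | nil => exact List.prefix_refl s
  | cons x cs ih =>
    refine List.IsPrefix.trans ?_ (ih (PySem.Set.add s x))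
    unfold PySem.Set.add
    split <;> simp

-- updating with fresh, distinct elements appends them
theorem set_update_of_nodup {α : Type} [BEq α] [LawfulBEq α] (cs : List α) (s : PySem.Set α)
    (hnd : cs.Nodup) (hf : ∀ x ∈ cs, x ∉ s) : PySem.Set.update s cs = s ++ cs := by
  induction cs generalizing s with
  | nil => simp [PySem.Set.update]
  | cons x cs ih =>
    have hxs : x ∉ s := hf x (by simp)
    have hcf : s.contains x = false := by
      rw [Bool.eq_false_iff]
      intro hc
      exact hxs ((PySem.Set.contains_iff s x).mp hc)
    have hx : PySem.Set.add s x = s ++ [x] := by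
      unfold PySem.Set.add
      rw [hcf]
      simp
    have : PySem.Set.update (s ++ [x]) cs = (s ++ [x]) ++ cs := by
      refine ih (s ++ [x]) (List.Nodup.of_cons hnd) ?_
      intro y hy
      simp only [List.mem_append, List.mem_singleton]
      rintro (h | rfl)
      · exact hf y (by simp [hy]) h
      · exact (List.nodup_cons.mp hnd).1 hy
    show PySem.Set.update (PySem.Set.add s x) cs = _
    rw [hx, this]
    simp

theorem set_update_sublist {α : Type} [BEq α] (cs : List α) :
    ∀ s : PySem.Set α, List.Sublist (PySem.Set.update s cs) (s ++ cs) := by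
  induction cs with
  | nil => intro s; simp [PySem.Set.update]
  | cons x cs ih =>
    intro s
    have h1 : List.Sublist (PySem.Set.add s x) (s ++ [x]) := by
      unfold PySem.Set.add
      split
      · simp
      · simp
    exact (ih (PySem.Set.add s x)).trans (by simpa using h1.append (List.Sublist.refl cs))

theorem set_ofList_length_iff {α : Type} [BEq α] [LawfulBEq α] (l : List α) :
    (PySem.Set.ofList l).length = l.length ↔ l.Nodup := by
  constructor
  · intro h
    have hsub : List.Sublist (PySem.Set.ofList l) l := by
      simpa using set_update_sublist l []
    have := List.Sublist.eq_of_length hsub h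
    rw [← this]
    exact PySem.Set.nodup_ofList l
  · intro h
    have : PySem.Set.ofList l = ([] : List α) ++ l := set_update_of_nodup l [] h (by simp)
    simp [this]

-- dict(pairs) over key-distinct pairs returns exactly those pairs
theorem dict_update_items (ps : List (Int × Int)) (d : PySem.Dict Int Int)
    (hnd : (ps.map Prod.fst).Nodup) (hf : ∀ p ∈ ps, d.contains p.1 = false) :
    (d.update ps).items = d.items ++ ps := by
  induction ps generalizing d with
  | nil => simp [PySem.Dict.update]
  | cons p ps ih =>
    obtain ⟨s, t⟩ := p
    have h1 : (d.insert s t).items = d.items ++ [(s, t)] :=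
      PySem.Dict.items_insert_of_not_contains d t (hf (s, t) (by simp))
    have h2 : (d.update ((s, t) :: ps)) = (d.insert s t).update ps := by
      simp [PySem.Dict.update]
    rw [h2, ih (d.insert s t) (by simpa using hnd.of_cons) ?_, h1]
    · simp
    · intro p hp
      cases hc : (d.insert s t).contains p.1
      · rfl
      · exfalso
        have := (PySem.Dict.contains_iff_mem_keys _ _).mp hc
        rw [PySem.Dict.keys, h1] at this
        simp only [List.map_append, List.mem_append] at this
        rcases this with h | h
        · have := (PySem.Dict.contains_iff_mem_keys d p.1).mpr (by simpa [PySem.Dict.keys] using h)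
          rw [hf p (by simp [hp])] at this
          exact Bool.false_ne_true this
        · simp only [List.map_cons, List.map_nil, List.mem_singleton] at h
          exact (List.nodup_cons.mp hnd).1 (by simpa [← h] using List.mem_map_of_mem (f := Prod.fst) hp)

-- the heart: runA succeeds iff the deduplicated pair set is key-distinct, and then yields it
theorem runA_invariant (cs : List (Int × Int)) : ∀ (m : PySem.Dict Int Int), m.keys.Nodup →
    match runA cs m with
    | some m' => PySem.Set.update m.items cs = m'.items ∧ m'.keys.Nodup
    | none => ¬ ((PySem.Set.update m.items cs).map Prod.fst).Nodup := by
  induction cs with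
  | nil => intro m hm; exact ⟨rfl, hm⟩
  | cons p cs ih =>
    rintro m hm
    obtain ⟨s, t⟩ := p
    have hupd : PySem.Set.update m.items ((s, t) :: cs)
        = PySem.Set.update (PySem.Set.add m.items (s, t)) cs := rfl
    simp only [runA]
    cases hg : m.get? s with
    | some v =>
      have hmem : (s, v) ∈ m.items := PySem.Dict.mem_items_of_get?_eq_some m hg
      by_cases hv : v = t
      · -- pair already recorded: add is a no-op
        have hadd : PySem.Set.add m.items (s, t) = m.items := by
          unfold PySem.Set.add
          have hct : PySem.Set.contains m.items (s, t) = true :=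
            (PySem.Set.contains_iff _ _).mpr (by rw [← hv]; exact hmem)
          rw [hct]
          simp
        simpa [hv, hupd, hadd] using ih m hm
      · -- conflict: (s,t) is new but its key s is not — duplicate key forever after
        simp only [if_pos hv]
        have hnotmem : (s, t) ∉ m.items := by
          intro hmem'
          exact hv (Option.some.inj ((PySem.Dict.get?_of_mem_items m hmem' hm).symm.trans hg)).symm
        have hadd : PySem.Set.add m.items (s, t) = m.items ++ [(s, t)] := by
          unfold PySem.Set.add
          have hcf : PySem.Set.contains m.items (s, t) = false := by
            rw [Bool.eq_false_iff]
            intro hcc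
            exact hnotmem ((PySem.Set.contains_iff _ _).mp hcc)
          rw [hcf]
          simp
        have hdup : ¬ ((m.items ++ [(s, t)]).map Prod.fst).Nodup := by
          intro hnod
          simp only [List.map_append, List.map_cons, List.map_nil, List.nodup_append] at hnod
          exact hnod.2.2 s (List.mem_map_of_mem (f := Prod.fst) hmem) s (by simp) rfl
        rw [hupd, hadd]
        intro hnod
        exact hdup (hnod.sublist (List.Sublist.map Prod.fst
          (set_update_prefix cs (m.items ++ [(s, t)])).sublist))
    | none =>
      have hc : m.contains s = false := (PySem.Dict.get?_eq_none_iff_contains m s).mp hg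
      have hnotmem : (s, t) ∉ m.items := fun hmem' =>
        Bool.false_ne_true (hc ▸ (PySem.Dict.contains_iff_mem_keys m s).mpr
          (PySem.Dict.mem_keys_of_mem_items m hmem'))
      have hcf : PySem.Set.contains m.items (s, t) = false := by
        rw [Bool.eq_false_iff]
        intro hcc
        exact hnotmem ((PySem.Set.contains_iff _ _).mp hcc)
      have hadd : PySem.Set.add m.items (s, t) = (m.insert s t).items := by
        unfold PySem.Set.add
        rw [hcf, PySem.Dict.items_insert_of_not_contains m t hc]
        simp
      simpa [hupd, hadd] using ih (m.insert s t) (PySem.Dict.nodup_keys_insert m s t hm)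

-- every in-range cell lookup succeeds on Pre_-rectangular grids
theorem cells_ok (src tgt : List (List Int))
    (hlen : src.length = tgt.length)
    (hs : ∀ r ∈ src, (src.headD []).length ≤ r.length)
    (ht : ∀ r ∈ tgt, (src.headD []).length ≤ r.length) :
    ∀ i ∈ PySem.List.pyRange 0 (src.length : Int) 1,
      ∀ j ∈ PySem.List.pyRange 0 (firstRowLen src) 1,
        ∃ s t, cellAt src i j = some s ∧ cellAt tgt i j = some t := by
  intro i hi j hj
  rw [PySem.List.mem_pyRange_one] at hi hj
  unfold firstRowLen at hj
  obtain ⟨hi0, hiL⟩ := hi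
  obtain ⟨hj0, hjL⟩ := hj
  have getRow : ∀ (g : List (List Int)), (i.toNat < g.length) →
      (∀ r ∈ g, (src.headD []).length ≤ r.length) → ∃ v, cellAt g i j = some v := by
    intro g hgl hrows
    unfold cellAt
    have hi' : (i.toNat : Int) = i := Int.toNat_of_nonneg hi0
    rw [← hi', PySem.List.pyGet?_natCast]
    have hrow : g[i.toNat]? = some g[i.toNat] := List.getElem?_eq_getElem hgl
    rw [hrow]
    have hjlt : j.toNat < g[i.toNat].length :=
      lt_of_lt_of_le (by omega) (hrows _ (List.getElem_mem hgl))
    have hj' : (j.toNat : Int) = j := Int.toNat_of_nonneg hj0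
    simp only [Option.bind_some]
    rw [← hj', PySem.List.pyGet?_natCast]
    exact ⟨_, List.getElem?_eq_getElem hjlt⟩
  obtain ⟨s, hsv⟩ := getRow src (by omega) hs
  obtain ⟨t, htv⟩ := getRow tgt (by omega) ht
  exact ⟨s, t, hsv, htv⟩

-- ===== VERDICT (by name: the statement is the Claim_ definition above) =====
theorem find_color_mapping_spec : Claim_equal_find_color_mapping := by
  intro src tgt _ hpre
  unfold Spec_find_color_mapping find_color_mapping find_color_mapping_alt
  cases hshape : gridsSameShape src tgt with
  | false => simp
  | true =>
    simp only [if_true]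
    have hsame : PvSameShape src tgt := (gridsSameShape_iff src tgt).mp hshape
    rcases hpre with hpre | ⟨hs, ht⟩
    · exact absurd hsame hpre
    obtain ⟨cs, hcs, hrun⟩ := fcmOuter_eq_runA src tgt _
      (cells_ok src tgt hsame.1 hs ht)
    rw [hcs, hrun PySem.Dict.empty]
    have hinv := runA_invariant cs PySem.Dict.empty PySem.Dict.nodup_keys_empty
    have hofl : PySem.Set.update PySem.Dict.empty.items cs = PySem.Set.ofList cs := rfl
    cases hr : runA cs PySem.Dict.empty with
    | some m' =>
      rw [hr] at hinv
      obtain ⟨hitems, hknd⟩ := hinv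
      rw [hofl] at hitems
      have hkeysnd : ((PySem.Set.ofList cs).map Prod.fst).Nodup := by
        rw [hitems]; exact hknd
      have hlen : (PySem.Set.ofList ((PySem.Set.ofList cs).map Prod.fst)).length
          = ((PySem.Set.ofList cs).map Prod.fst).length :=
        (set_ofList_length_iff _).mpr hkeysnd
      have hlen' : (PySem.Set.ofList ((PySem.Set.ofList cs).map Prod.fst)).length
          = (PySem.Set.ofList cs).length := by simpa using hlen
      simp only [Option.map_some, id, hlen', ne_eq, not_true_eq_false, if_false]
      have hdict : (PySem.Dict.ofList (PySem.Set.ofList cs)).items = PySem.Set.ofList cs := by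
        have := dict_update_items (PySem.Set.ofList cs) PySem.Dict.empty hkeysnd
          (fun p _ => rfl)
        simpa [PySem.Dict.ofList] using this
      rw [hdict, hitems]
    | none =>
      rw [hr] at hinv
      rw [hofl] at hinv
      have hne : (PySem.Set.ofList ((PySem.Set.ofList cs).map Prod.fst)).length
          ≠ (PySem.Set.ofList cs).length := by
        intro heq
        apply hinv
        have : (PySem.Set.ofList ((PySem.Set.ofList cs).map Prod.fst)).length
            = ((PySem.Set.ofList cs).map Prod.fst).length := by simpa using heq
        exact (set_ofList_length_iff _).mp this
      simp [hne]
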